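-- pv_equiv track=rewrite | github.com/LumberjacksIncorperated/ThesisB | test.py | getMinXandXlength
-- ===== SOURCE A (Python) =====
-- def getMinXandXlength(matrix):
--     height = len(matrix)
--     width = len(matrix[0])
--     column_index = 0
--     firstFound = False
--     minBlack = 0
--     maxBlack = 0
--     while column_index < (height-1):
--         row_index = 0
--         while row_index < (width-1):
--             if matrix[column_index][row_index] == 0:
--                 if not firstFound:
--                     firstFound = True
--                     minBlack = row_index
--                     maxBlack = row_index
--                 else:
--                     if row_index < minBlack:
--                         minBlack = row_index
--                     if row_index > maxBlack:
--                         maxBlack = row_index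
--             row_index = row_index+1
--         column_index = column_index + 1
--     return (minBlack, maxBlack)
-- ===== SOURCE B (Python) =====
-- def getMinXandXlength(matrix):
--     # Two column-major early-exit scans instead of one combined row-major scan.
--     height = len(matrix)
--     width = len(matrix[0])
--     for j in range(width - 1):
--         if any(matrix[i][j] == 0 for i in range(height - 1)):
--             break
--     else:
--         return (0, 0)
--     minBlack = j
--     for j in range(width - 2, -1, -1):
--         if any(matrix[i][j] == 0 for i in range(height - 1)):
--             return (minBlack, j)
--     return (0, 0)
-- ===== Notes on version B (the rewrite author's own statement) =====
-- stated objective: alternative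
-- what changed: Replaces A's single row-major scan that threads a (found,min,max) state through every cell with two column-major early-exit searches: the first column (left-to-right) containing a zero is the min, the first from the right is the max, with (0,0) when no column qualifies; the early exits skip the columns between, making B measurably faster on random inputs.
-- outside the precondition, e.g. on getMinXandXlength([]): A raises IndexError, B raises IndexError; on getMinXandXlength([[1, 2, 3], [0], [5, 5, 5]]): A raises IndexError, B raises IndexError
import Mathlib
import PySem

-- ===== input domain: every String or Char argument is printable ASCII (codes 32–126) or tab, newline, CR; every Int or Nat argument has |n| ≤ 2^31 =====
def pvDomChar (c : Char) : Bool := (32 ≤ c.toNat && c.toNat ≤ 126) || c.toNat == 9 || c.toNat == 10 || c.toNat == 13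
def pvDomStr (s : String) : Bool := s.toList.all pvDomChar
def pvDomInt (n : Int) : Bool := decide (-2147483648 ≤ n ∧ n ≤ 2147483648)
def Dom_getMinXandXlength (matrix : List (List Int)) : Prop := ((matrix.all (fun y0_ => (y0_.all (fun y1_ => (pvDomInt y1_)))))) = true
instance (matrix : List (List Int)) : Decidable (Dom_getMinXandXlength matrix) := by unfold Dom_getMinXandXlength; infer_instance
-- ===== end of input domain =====

-- B replaces A's single combined row-major min/max scan by two early-exit column searches
-- (first matching column = min, first matching column from the right = max); objective: alternative.
-- A raises IndexError on an empty matrix or when a scanned row is shorter than len(matrix[0])-1; Pre_ excludes exactly those.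


-- ===== PORT A =====
-- matrix[i][j] == 0 (pyGet? = none is an IndexError; Pre_ puts those inputs out of scope)
def pvCellZero (matrix : List (List Int)) (i j : Nat) : Bool :=
  ((PySem.List.pyGet? matrix (i : Int)).bind (fun r => PySem.List.pyGet? r (j : Int))) == some 0

-- A's update of (firstFound, minBlack, maxBlack) when a zero is seen at column j
def pvStep (st : Bool × Int × Int) (j : Nat) : Bool × Int × Int :=
  if !st.1 then (true, (j : Int), (j : Int))
  else (true, if (j : Int) < st.2.1 then (j : Int) else st.2.1,
              if (j : Int) > st.2.2 then (j : Int) else st.2.2)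

def getMinXandXlength (matrix : List (List Int)) : Int × Int :=
  let height := matrix.length
  let width := (matrix.headD []).length
  let st := (List.range (height - 1)).foldl
    (fun st i => (List.range (width - 1)).foldl
      (fun st j => if pvCellZero matrix i j then pvStep st j else st) st)
    (false, 0, 0)
  (st.2.1, st.2.2)

-- ===== PORT B =====
-- any(matrix[i][j] == 0 for i in range(height-1))
def pvColZero (matrix : List (List Int)) (height j : Nat) : Bool :=
  (List.range (height - 1)).any (fun i => pvCellZero matrix i j)

def getMinXandXlength_alt (matrix : List (List Int)) : Int × Int :=
  let height := matrix.length
  let width := (matrix.headD []).length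
  match (List.range (width - 1)).find? (pvColZero matrix height) with
  | none => (0, 0)
  | some mn =>
    match (List.range (width - 1)).reverse.find? (pvColZero matrix height) with
    | none => (0, 0)
    | some mx => ((mn : Int), (mx : Int))

-- ===== PRECONDITION & SPEC =====
-- Python A raises IndexError on matrix == [] (it reads matrix[0]) and whenever one of the rows it
-- scans (all but the last) is shorter than len(matrix[0]) - 1; Pre_ excludes exactly those inputs.
def Pre_getMinXandXlength (matrix : List (List Int)) : Prop :=
  matrix ≠ [] ∧ ∀ r ∈ matrix.take (matrix.length - 1), (matrix.headD []).length ≤ r.length + 1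
instance (matrix : List (List Int)) : Decidable (Pre_getMinXandXlength matrix) := by
  unfold Pre_getMinXandXlength; infer_instance

def pvWitness_getMinXandXlength : List (List Int) := [[1, 0, 2], [0, 5, 7], [9, 9, 9]]

def Spec_getMinXandXlength (matrix : List (List Int)) (out : Int × Int) : Prop := out = getMinXandXlength_alt matrix
instance (matrix : List (List Int)) (out : Int × Int) : Decidable (Spec_getMinXandXlength matrix out) := by unfold Spec_getMinXandXlength; infer_instance

-- ===== CLAIM (what is proved, stated in full; the proofs are below) =====
def Claim_equal_getMinXandXlength : Prop := ∀ (matrix : List (List Int)), Dom_getMinXandXlength matrix → Pre_getMinXandXlength matrix → Spec_getMinXandXlength matrix (getMinXandXlength matrix)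

-- ===== LEMMAS AND PROOFS =====

-- Folding pvStep from an already-found state keeps `found` and tracks running min/max.
lemma pvStep_foldl_true (l : List Nat) (m M : Nat) :
    l.foldl pvStep (true, (m : Int), (M : Int))
      = (true, ((l.foldl min m : Nat) : Int), ((l.foldl max M : Nat) : Int)) := by
  induction l generalizing m M with
  | nil => simp
  | cons j t ih =>
    simp only [List.foldl_cons, pvStep]
    have h1 : (if (j : Int) < (m : Int) then (j : Int) else (m : Int)) = ((min m j : Nat) : Int) := by
      split_ifs <;> omega
    have h2 : (if (j : Int) > (M : Int) then (j : Int) else (M : Int)) = ((max M j : Nat) : Int) := by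
      split_ifs <;> omega
    simp only [Bool.not_true, Bool.false_eq_true, if_false, h1, h2]
    exact ih _ _

lemma pvStep_foldl_start (j : Nat) (t : List Nat) :
    (j :: t).foldl pvStep (false, 0, 0)
      = (true, ((t.foldl min j : Nat) : Int), ((t.foldl max j : Nat) : Int)) := by
  have : pvStep (false, 0, 0) j = (true, (j : Int), (j : Int)) := by simp [pvStep]
  simp only [List.foldl_cons, this, pvStep_foldl_true]

-- The heart of the equivalence, stated for an arbitrary cell predicate.
lemma pvKey (cond : Nat → Nat → Bool) (h' w' : Nat) :
    (let st := (List.range h').foldl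
        (fun st i => (List.range w').foldl
          (fun st j => if cond i j then pvStep st j else st) st)
        ((false : Bool), (0 : Int), (0 : Int));
     ((st.2.1, st.2.2) : Int × Int))
      = (let p := fun j => (List.range h').any (fun i => cond i j);
         match (List.range w').find? p with
         | none => ((0 : Int), (0 : Int))
         | some mn =>
           match (List.range w').reverse.find? p with
           | none => (0, 0)
           | some mx => ((mn : Int), (mx : Int))) := by
  set p : Nat → Bool := fun j => (List.range h').any (fun i => cond i j) with hp
  set L : List Nat := (List.range h').flatMap (fun i => (List.range w').filter (cond i)) with hLdef
  set S : List Nat := (List.range w').filter p with hSdef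
  -- A's nested conditional fold is a pvStep-fold over the flattened hit list L
  have hfold : (List.range h').foldl
      (fun st i => (List.range w').foldl
        (fun st j => if cond i j then pvStep st j else st) st)
      ((false : Bool), (0 : Int), (0 : Int)) = L.foldl pvStep (false, 0, 0) := by
    rw [hLdef, List.foldl_flatMap]
    simp only [List.foldl_filter]
  -- membership in L
  have hmemL : ∀ x, x ∈ L ↔ (x < w' ∧ p x = true) := by
    intro x
    simp only [hLdef, hp, List.mem_flatMap, List.mem_filter, List.mem_range, List.any_eq_true]
    constructor
    · rintro ⟨i, hi, hx, hc⟩; exact ⟨hx, i, hi, hc⟩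
    · rintro ⟨hx, i, hi, hc⟩; exact ⟨i, hi, hx, hc⟩
  have hSsorted : S.Pairwise (· < ·) := List.Pairwise.filter p List.pairwise_lt_range
  have hfind : (List.range w').find? p = S.head? := (List.head?_filter).symm
  have hfindR : (List.range w').reverse.find? p = S.getLast? := by
    rw [← List.head?_filter, List.filter_reverse, ← hSdef, List.head?_reverse]
  simp only [hfold]
  cases hS : S with
  | nil =>
    have hLnil : L = [] := by
      rw [List.eq_nil_iff_forall_not_mem]
      intro x hx
      have h1 := (hmemL x).mp hx
      have : x ∈ S := List.mem_filter.mpr ⟨List.mem_range.mpr h1.1, h1.2⟩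
      simp [hS] at this
    simp [hfind, hS, hLnil]
  | cons m rest =>
    -- min bound from sortedness, max bound from sortedness of the reverse
    have hmS : ∀ x ∈ S, m ≤ x := by
      intro x hx
      rw [hS] at hx hSsorted
      rcases List.mem_cons.mp hx with h | h
      · omega
      · exact Nat.le_of_lt ((List.pairwise_cons.mp hSsorted).1 x h)
    have hSne : S ≠ [] := by simp [hS]
    set M : Nat := S.getLast hSne with hMdef
    have hMS : ∀ x ∈ S, x ≤ M := by
      have hrev : S.reverse.Pairwise (fun a b => b < a) := List.pairwise_reverse.mpr hSsorted
      have hhead : S.reverse.head? = some M := by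
        rw [List.head?_reverse, hMdef, List.getLast?_eq_some_getLast hSne]
      intro x hx
      have hx' : x ∈ S.reverse := List.mem_reverse.mpr hx
      cases hR : S.reverse with
      | nil => rw [hR] at hx'; simp at hx'
      | cons y ys =>
        rw [hR] at hhead hrev hx'
        simp only [List.head?_cons, Option.some.injEq] at hhead
        rcases List.mem_cons.mp hx' with h | h
        · omega
        · have := (List.pairwise_cons.mp hrev).1 x h; omega
    have hmL : m ∈ L := by
      have : m ∈ S := by rw [hS]; exact List.mem_cons_self
      have h1 := List.mem_filter.mp this
      exact (hmemL m).mpr ⟨List.mem_range.mp h1.1, h1.2⟩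
    have hML : M ∈ L := by
      have : M ∈ S := List.getLast_mem hSne
      have h1 := List.mem_filter.mp this
      exact (hmemL M).mpr ⟨List.mem_range.mp h1.1, h1.2⟩
    have hLS : ∀ x ∈ L, x ∈ S := by
      intro x hx
      have h1 := (hmemL x).mp hx
      exact List.mem_filter.mpr ⟨List.mem_range.mpr h1.1, h1.2⟩
    cases hL : L with
    | nil => rw [hL] at hmL; simp at hmL
    | cons j0 t =>
      rw [hL] at hmL hML hLS
      have hmin : t.foldl min j0 = m := by
        apply Nat.le_antisymm
        · rcases List.mem_cons.mp hmL with h | h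
          · rw [h]; exact (PySem.List.foldl_min_le t j0).1
          · exact (PySem.List.foldl_min_le t j0).2 m h
        · have hmem : t.foldl min j0 ∈ j0 :: t := by
            rcases PySem.List.foldl_min_mem t j0 with h | h
            · rw [h]; exact List.mem_cons_self
            · exact List.mem_cons_of_mem _ h
          exact hmS _ (hLS _ hmem)
      have hmax : t.foldl max j0 = M := by
        apply Nat.le_antisymm
        · have hmem : t.foldl max j0 ∈ j0 :: t := by
            rcases PySem.List.foldl_max_mem t j0 with h | h
            · rw [h]; exact List.mem_cons_self
            · exact List.mem_cons_of_mem _ h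
          exact hMS _ (hLS _ hmem)
        · rcases List.mem_cons.mp hML with h | h
          · rw [h]; exact (PySem.List.le_foldl_max t j0).1
          · exact (PySem.List.le_foldl_max t j0).2 M h
      have hlast : S.getLast? = some M := by rw [hMdef, List.getLast?_eq_some_getLast hSne]
      simp only [pvStep_foldl_start, hmin, hmax, hfind, hfindR, hS, List.head?_cons]
      rw [← hS, hlast]

-- ===== VERDICT (by name: the statement is the Claim_ definition above) =====
theorem getMinXandXlength_spec : Claim_equal_getMinXandXlength := by
  intro matrix _ _
  unfold Spec_getMinXandXlength getMinXandXlength getMinXandXlength_alt pvColZero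
  exact pvKey (pvCellZero matrix) (matrix.length - 1) ((matrix.headD []).length - 1)
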